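-- pv_equiv track=rewrite | github.com/morgoth1145/advent-of-code | 2020/11/solution.py | compute_seen_neighbors
-- ===== SOURCE A (Python) =====
-- def compute_seen_neighbors(grid):
--     grid_neighbors = [l[:] for l in grid]
--     for i in range(len(grid)):
--         for j in range(len(grid[i])):
--             if grid[i][j] == '.':
--                 grid_neighbors[i][j] = None
--                 continue
--             neighbors = []
--             for dx in (-1, 0, 1):
--                 for dy in (-1, 0, 1):
--                     if dx == dy == 0:
--                         continue
--                     x, y = i, j
--                     while True:
--                         x += dx
--                         y += dy
--                         if x not in range(0, len(grid)):
--                             break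
--                         if y not in range(0, len(grid[x])):
--                             break
--                         if grid[x][y] == '.':
--                             continue
--                         neighbors.append((x, y))
--                         break
--             grid_neighbors[i][j] = neighbors
--     return grid_neighbors
-- ===== SOURCE B (Python) =====
-- def compute_seen_neighbors(grid):
--     # Eight O(N*M) directional line sweeps propagating the last-seen seat.
--     R = len(grid)
--
--     def top_sweep(dy):
--         t = []
--         prev_g, prev_d = [], []
--         for i, row in enumerate(grid):
--             d = []
--             for j in range(len(row)):
--                 y = j + dy
--                 if 0 <= y < len(prev_g):
--                     d.append((i - 1, y) if prev_g[y] != '.' else prev_d[y])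
--                 else:
--                     d.append(None)
--             t.append(d)
--             prev_g, prev_d = row, d
--         return t
--
--     def bot_sweep(dy):
--         t = [None] * R
--         next_g, next_d = [], []
--         for i in range(R - 1, -1, -1):
--             row = grid[i]
--             d = []
--             for j in range(len(row)):
--                 y = j + dy
--                 if 0 <= y < len(next_g):
--                     d.append((i + 1, y) if next_g[y] != '.' else next_d[y])
--                 else:
--                     d.append(None)
--             t[i] = d
--             next_g, next_d = row, d
--         return t
--
--     def left_sweep():
--         t = []
--         for i, row in enumerate(grid):
--             d = []
--             prev = None
--             for j in range(len(row)):
--                 v = None if j == 0 else ((i, j - 1) if row[j - 1] != '.' else prev)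
--                 d.append(v)
--                 prev = v
--             t.append(d)
--         return t
--
--     def right_sweep():
--         t = []
--         for i, row in enumerate(grid):
--             n = len(row)
--             d = [None] * n
--             for j in range(n - 2, -1, -1):
--                 d[j] = (i, j + 1) if row[j + 1] != '.' else d[j + 1]
--             t.append(d)
--         return t
--
--     tables = [top_sweep(-1), top_sweep(0), top_sweep(1),
--               left_sweep(), right_sweep(),
--               bot_sweep(-1), bot_sweep(0), bot_sweep(1)]
--     return [[None if row[j] == '.' else
--              [t[i][j] for t in tables if t[i][j] is not None]
--              for j in range(len(row))]
--             for i, row in enumerate(grid)]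
-- ===== Notes on version B (the rewrite author's own statement) =====
-- stated objective: faster
-- what changed: Replaces the per-cell ray scan in each of the 8 directions by eight whole-grid dynamic-programming line sweeps that propagate the last seen seat, then assembles each cell's neighbor list from the eight tables.
import Mathlib
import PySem

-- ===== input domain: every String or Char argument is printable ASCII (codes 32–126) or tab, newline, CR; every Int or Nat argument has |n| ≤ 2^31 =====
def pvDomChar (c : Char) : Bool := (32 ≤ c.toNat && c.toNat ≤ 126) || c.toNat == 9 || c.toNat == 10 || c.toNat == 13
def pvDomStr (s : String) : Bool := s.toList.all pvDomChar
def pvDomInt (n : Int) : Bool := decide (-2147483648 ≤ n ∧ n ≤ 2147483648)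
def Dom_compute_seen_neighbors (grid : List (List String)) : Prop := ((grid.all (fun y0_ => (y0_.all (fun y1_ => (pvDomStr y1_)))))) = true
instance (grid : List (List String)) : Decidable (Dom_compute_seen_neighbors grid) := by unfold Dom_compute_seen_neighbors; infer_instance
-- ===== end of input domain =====

-- B replaces A's per-cell ray scan in 8 directions by eight O(N*M) directional DP line
-- sweeps propagating the last seen seat (asymptotically faster); return values are equal.

-- ===== PORT A =====

-- xs[i] for a known-nonnegative-or-invalid int index (A only indexes after its own range checks)
def lookAt {α : Type} (l : List α) (i : Int) : Option α :=
  if 0 ≤ i then l[i.toNat]? else none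

-- grid[x][y] guarded by A's two range checks (none = one of the checks failed)
def cellAt (grid : List (List String)) (x y : Int) : Option String :=
  (lookAt grid x).bind (fun r => lookAt r y)

-- A's inner `while True` loop: step (dx,dy) from (x,y) until out of range or a seat is found.
-- Fuel-based; pvFuel below always exceeds the number of iterations (proved in the lemmas).
def scanA (grid : List (List String)) (dx dy : Int) : Nat → Int → Int → Option (Int × Int)
  | 0, _, _ => none
  | n+1, x, y =>
    match cellAt grid (x+dx) (y+dy) with
    | none => none
    | some c => if c = "." then scanA grid dx dy n (x+dx) (y+dy) else some (x+dx, y+dy)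

def pvFuel (grid : List (List String)) : Nat :=
  grid.length + (grid.map List.length).sum + 2

-- the 8 (dx,dy) pairs of A's nested loop, in A's order, (0,0) skipped
def dirList : List (Int × Int) :=
  [(-1,-1),(-1,0),(-1,1),(0,-1),(0,1),(1,-1),(1,0),(1,1)]

def compute_seen_neighbors (grid : List (List String)) : List (List (Option (List (Int × Int)))) :=
  (PySem.List.enumerate grid 0).map (fun p =>
    (PySem.List.enumerate p.2 0).map (fun q =>
      if q.2 = "." then none
      else some (dirList.foldl (fun acc d =>
        match scanA grid d.1 d.2 (pvFuel grid) p.1 q.1 with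
        | some pt => acc ++ [pt]
        | none => acc) [])))

-- ===== PORT B =====

-- dp value of one cell of a vertical sweep: pG/pD are the grid row and dp row the
-- direction points to (x is that row's index); Source B's inner `for j in range(len(row))` body
def vcell (dy x : Int) (pG : List String) (pD : List (Option (Int × Int))) (j : Nat) : Option (Int × Int) :=
  match lookAt pG ((j : Int) + dy) with
  | none => none
  | some c => if c = "." then (lookAt pD ((j : Int) + dy)).join else some (x, (j : Int) + dy)

def mkRow (dy x : Int) (pG : List String) (pD : List (Option (Int × Int))) (len : Nat) : List (Option (Int × Int)) :=
  (List.range len).map (vcell dy x pG pD)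

-- Source B top_sweep: top-to-bottom, carrying the previous grid row and dp row
def topGo (dy : Int) : Int → List String → List (Option (Int × Int)) → List (List String) → List (List (Option (Int × Int)))
  | _, _, _, [] => []
  | i, pG, pD, r :: rs =>
    let d := mkRow dy (i-1) pG pD r.length
    d :: topGo dy (i+1) r d rs

def topSweep (dy : Int) (grid : List (List String)) : List (List (Option (Int × Int))) :=
  topGo dy 0 [] [] grid

-- Source B bot_sweep: bottom-to-top (structural recursion computing the tail first)
def botGo (dy : Int) : Int → List (List String) → List (List (Option (Int × Int)))
  | _, [] => []
  | i, r :: rs =>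
    let rest := botGo dy (i+1) rs
    mkRow dy (i+1) (rs.head?.getD []) (rest.head?.getD []) r.length :: rest

def botSweep (dy : Int) (grid : List (List String)) : List (List (Option (Int × Int))) :=
  botGo dy 0 grid

-- Source B left_sweep: left-to-right within each row, carrying previous cell and its dp value
def leftGo (i : Int) : Int → Option String → Option (Int × Int) → List String → List (Option (Int × Int))
  | _, _, _, [] => []
  | j, pC, pD, c :: cs =>
    let v := match pC with
      | none => none
      | some pc => if pc = "." then pD else some (i, j-1)
    v :: leftGo i (j+1) (some c) v cs

def leftTable (grid : List (List String)) : List (List (Option (Int × Int))) :=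
  (PySem.List.enumerate grid 0).map (fun p => leftGo p.1 0 none none p.2)

-- Source B right_sweep: right-to-left within each row (tail computed first)
def rightGo (i : Int) : Int → List String → List (Option (Int × Int))
  | _, [] => []
  | j, _ :: cs =>
    let rest := rightGo i (j+1) cs
    (match cs.head? with
     | none => none
     | some c' => if c' = "." then rest.head?.join else some (i, j+1)) :: rest

def rightTable (grid : List (List String)) : List (List (Option (Int × Int))) :=
  (PySem.List.enumerate grid 0).map (fun p => rightGo p.1 0 p.2)

-- t[i][j] of a dp table (Source B only reads in-range entries; join flattens the Option of Option)
def at2 (t : List (List (Option (Int × Int)))) (x y : Int) : Option (Int × Int) :=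
  ((lookAt t x).bind (fun r => lookAt r y)).join

def compute_seen_neighbors_alt (grid : List (List String)) : List (List (Option (List (Int × Int)))) :=
  let ts := [topSweep (-1) grid, topSweep 0 grid, topSweep 1 grid,
             leftTable grid, rightTable grid,
             botSweep (-1) grid, botSweep 0 grid, botSweep 1 grid]
  (PySem.List.enumerate grid 0).map (fun p =>
    (PySem.List.enumerate p.2 0).map (fun q =>
      if q.2 = "." then none
      else some (ts.filterMap (fun t => at2 t p.1 q.1))))

-- ===== PRECONDITION & SPEC =====
def Spec_compute_seen_neighbors (grid : List (List String)) (out : List (List (Option (List (Int × Int))))) : Prop := out = compute_seen_neighbors_alt grid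
instance (grid : List (List String)) (out : List (List (Option (List (Int × Int))))) : Decidable (Spec_compute_seen_neighbors grid out) := by unfold Spec_compute_seen_neighbors; infer_instance

-- ===== CLAIM (what is proved, stated in full; the proofs are below) =====
def Claim_equal_compute_seen_neighbors : Prop := ∀ (grid : List (List String)), Dom_compute_seen_neighbors grid → Spec_compute_seen_neighbors grid (compute_seen_neighbors grid)

-- ===== LEMMAS AND PROOFS =====

-- A's one-direction step, abstracted over the "rest of the scan" function
def stepF (grid : List (List String)) (dx dy x y : Int) (f : Int → Int → Option (Int × Int)) : Option (Int × Int) :=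
  match cellAt grid (x+dx) (y+dy) with
  | none => none
  | some c => if c = "." then f (x+dx) (y+dy) else some (x+dx, y+dy)

lemma cellAt_elim {grid : List (List String)} {x y : Int} {c : String}
    (h : cellAt grid x y = some c) :
    0 ≤ x ∧ ∃ r, grid[x.toNat]? = some r ∧ 0 ≤ y ∧ r[y.toNat]? = some c := by
  unfold cellAt lookAt at h
  split at h
  · rename_i hx
    cases hr : grid[x.toNat]? with
    | none => rw [hr] at h; simp at h
    | some r =>
      rw [hr] at h; simp only [Option.bind_some] at h
      by_cases hy : 0 ≤ y
      · simp only [hy, if_pos] at h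
        exact ⟨hx, r, rfl, hy, h⟩
      · simp [hy] at h
  · simp at h

-- if the scan-function satisfies the step recurrence and admits a decreasing bound,
-- A's fuel loop computes it for any sufficient fuel
lemma scan_eq_of_rec (grid : List (List String)) (dx dy : Int)
    (A2 : Int → Int → Option (Int × Int)) (B : Int → Int → Nat)
    (hrec : ∀ x y, (cellAt grid x y).isSome → A2 x y = stepF grid dx dy x y A2)
    (hB : ∀ x y, (cellAt grid x y).isSome → (cellAt grid (x+dx) (y+dy)).isSome →
          B (x+dx) (y+dy) < B x y) :
    ∀ n x y, (cellAt grid x y).isSome → B x y ≤ n → scanA grid dx dy n x y = A2 x y := by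
  intro n
  induction n with
  | zero =>
    intro x y hc hb
    rw [hrec x y hc]
    unfold stepF scanA
    cases h' : cellAt grid (x+dx) (y+dy) with
    | none => simp
    | some c => exact absurd (hB x y hc (by simp [h'])) (by omega)
  | succ m ih =>
    intro x y hc hb
    rw [hrec x y hc]
    unfold stepF scanA
    cases h' : cellAt grid (x+dx) (y+dy) with
    | none => simp
    | some c =>
      simp only
      split
      · exact ih (x+dx) (y+dy) (by simp [h']) (by have := hB x y hc (by simp [h']); omega)
      · rfl

lemma mkRow_get (dy x : Int) (pG : List String) (pD : List (Option (Int × Int))) (n k : Nat) :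
    (mkRow dy x pG pD n)[k]? = if k < n then some (vcell dy x pG pD k) else none := by
  simp only [mkRow, List.getElem?_map]
  split <;> rename_i h
  · rw [List.getElem?_range h]; rfl
  · rw [List.getElem?_eq_none (by simpa using (by omega : n ≤ k))]
    rfl

lemma topGo_length (dy : Int) (i : Int) (pG : List String) (pD : List (Option (Int × Int)))
    (rows : List (List String)) : (topGo dy i pG pD rows).length = rows.length := by
  induction rows generalizing i pG pD with
  | nil => rfl
  | cons r rs ih => simp [topGo, ih]

lemma topGo_get_zero (dy : Int) (i : Int) (pG : List String) (pD : List (Option (Int × Int)))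
    (rows : List (List String)) :
    (topGo dy i pG pD rows)[0]? = rows[0]?.map (fun r => mkRow dy (i-1) pG pD r.length) := by
  cases rows <;> simp [topGo]

lemma topGo_get_succ (dy : Int) (i : Int) (pG : List String) (pD : List (Option (Int × Int)))
    (rows : List (List String)) (k : Nat) :
    (topGo dy i pG pD rows)[k+1]? =
      rows[k+1]?.map (fun r =>
        mkRow dy (i+k) (rows[k]?.getD []) (((topGo dy i pG pD rows)[k]?).getD []) r.length) := by
  induction rows generalizing i pG pD k with
  | nil => simp [topGo]
  | cons r rs ih =>
    cases k with
    | zero =>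
      cases rs with
      | nil => simp [topGo]
      | cons r' rs' =>
        simp only [topGo, List.getElem?_cons_succ, List.getElem?_cons_zero]
        norm_num
    | succ m =>
      simp only [topGo, List.getElem?_cons_succ]
      rw [ih]
      have h1 : i + 1 + (m:Int) = i + ((m:Nat)+1 : Nat) := by push_cast; ring
      rw [h1]

lemma botGo_length (dy : Int) (i : Int) (rows : List (List String)) :
    (botGo dy i rows).length = rows.length := by
  induction rows generalizing i with
  | nil => rfl
  | cons r rs ih => simp [botGo, ih]

lemma botGo_get (dy : Int) (i : Int) (rows : List (List String)) (k : Nat) :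
    (botGo dy i rows)[k]? =
      rows[k]?.map (fun r =>
        mkRow dy (i+k+1) (rows[k+1]?.getD []) (((botGo dy i rows)[k+1]?).getD []) r.length) := by
  induction rows generalizing i k with
  | nil => simp [botGo]
  | cons r rs ih =>
    cases k with
    | zero =>
      simp only [botGo, List.getElem?_cons_zero, List.getElem?_cons_succ, Option.map_some,
        List.head?_eq_getElem?]
      norm_num
    | succ m =>
      simp only [botGo, List.getElem?_cons_succ]
      rw [ih]
      have h1 : i + 1 + (m:Int) + 1 = i + ((m:Nat)+1 : Nat) + 1 := by push_cast; ring
      rw [h1]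

lemma leftGo_get_zero (i j : Int) (pC : Option String) (pD : Option (Int × Int)) (cs : List String) :
    (leftGo i j pC pD cs)[0]? = cs[0]?.map (fun _ =>
      match pC with
      | none => none
      | some pc => if pc = "." then pD else some (i, j-1)) := by
  cases cs <;> simp [leftGo]

lemma leftGo_get_succ (i j : Int) (pC : Option String) (pD : Option (Int × Int))
    (cs : List String) (k : Nat) :
    (leftGo i j pC pD cs)[k+1]? =
      cs[k+1]?.bind (fun _ => cs[k]?.map (fun pc =>
        if pc = "." then ((leftGo i j pC pD cs)[k]?).join else some (i, j + k))) := by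
  induction cs generalizing j pC pD k with
  | nil => simp [leftGo]
  | cons c cs' ih =>
    cases k with
    | zero =>
      cases cs' with
      | nil => simp [leftGo]
      | cons c' cs'' =>
        simp only [leftGo, List.getElem?_cons_succ, List.getElem?_cons_zero,
          Option.map_some, Option.bind_some, Option.join_some]
        norm_num
    | succ m =>
      simp only [leftGo, List.getElem?_cons_succ]
      rw [ih]
      have h1 : j + 1 + (m:Int) = j + ((m:Nat)+1 : Nat) := by push_cast; ring
      rw [h1]

lemma rightGo_get (i j : Int) (cs : List String) (k : Nat) :
    (rightGo i j cs)[k]? =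
      cs[k]?.map (fun _ =>
        match cs[k+1]? with
        | none => none
        | some c' => if c' = "." then ((rightGo i j cs)[k+1]?).join else some (i, j+k+1)) := by
  induction cs generalizing j k with
  | nil => simp [rightGo]
  | cons c cs' ih =>
    cases k with
    | zero =>
      simp only [rightGo, List.getElem?_cons_zero, List.getElem?_cons_succ, Option.map_some,
        List.head?_eq_getElem?]
      norm_num
    | succ m =>
      simp only [rightGo, List.getElem?_cons_succ]
      rw [ih]
      have h1 : j + 1 + (m:Int) + 1 = j + ((m:Nat)+1 : Nat) + 1 := by push_cast; ring
      rw [h1]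

lemma lookAt_nonneg {α : Type} (l : List α) {i : Int} (h : 0 ≤ i) : lookAt l i = l[i.toNat]? :=
  if_pos h

lemma lookAt_neg {α : Type} (l : List α) {i : Int} (h : i < 0) : lookAt l i = none :=
  if_neg (by omega)

lemma top_rec (grid : List (List String)) (dy x y : Int)
    (h : (cellAt grid x y).isSome) :
    at2 (topSweep dy grid) x y = stepF grid (-1) dy x y (at2 (topSweep dy grid)) := by
  obtain ⟨c, hc⟩ := Option.isSome_iff_exists.mp h
  obtain ⟨hx, r, hr, hy, hrc⟩ := cellAt_elim hc
  obtain ⟨hxlt, -⟩ := List.getElem?_eq_some_iff.mp hr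
  obtain ⟨hylt, -⟩ := List.getElem?_eq_some_iff.mp hrc
  cases hk : x.toNat with
  | zero =>
    have hg0 : grid[0]? = some r := by rw [← hk]; exact hr
    have hTx : (topSweep dy grid)[x.toNat]? = some (mkRow dy (0-1) [] [] r.length) := by
      rw [hk, topSweep, topGo_get_zero, hg0]
      simp
    rw [at2, stepF, lookAt_nonneg _ hx, hTx]
    simp only [Option.bind_some, lookAt_nonneg _ hy, mkRow_get, hylt, if_pos, Option.join_some]
    have : cellAt grid (x + -1) (y + dy) = none := by
      rw [cellAt, lookAt_neg grid (by omega : x + -1 < 0)]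
      rfl
    rw [this]
    simp [vcell, lookAt]
  | succ k =>
    have hxval : x = (k : Int) + 1 := by omega
    have hk1 : k < grid.length := by omega
    obtain ⟨gk, hgk⟩ := Option.isSome_iff_exists.mp (by simp [hk1] : (grid[k]?).isSome = true)
    obtain ⟨dk, hdk⟩ := Option.isSome_iff_exists.mp (by
      have hl : (topSweep dy grid).length = grid.length := topGo_length dy 0 [] [] grid
      simp [hl, hk1] : ((topSweep dy grid)[k]?).isSome = true)
    have hTx : (topSweep dy grid)[x.toNat]? = some (mkRow dy k gk dk r.length) := by
      rw [hk, topSweep, topGo_get_succ, ← topSweep]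
      rw [hk] at hr; rw [hr, hgk, hdk]
      simp
    have hx1 : (0:Int) ≤ x - 1 := by omega
    have hx1n : (x - 1).toNat = k := by omega
    rw [at2, stepF, lookAt_nonneg _ hx, hTx]
    simp only [Option.bind_some, lookAt_nonneg _ hy, mkRow_get, hylt, if_pos, Option.join_some]
    have hxm : x + -1 = x - 1 := by ring
    rw [hxm]
    have hcell : cellAt grid (x - 1) (y + dy) = lookAt gk (y + dy) := by
      simp [cellAt, lookAt_nonneg _ hx1, hx1n, hgk]
    have hyc : ((y.toNat : Int) + dy) = y + dy := by omega
    rw [hcell]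
    simp only [vcell, hyc]
    cases hlo : lookAt gk (y + dy) with
    | none => simp
    | some c' =>
      simp only
      split
      · rw [at2, lookAt_nonneg _ hx1, hx1n, hdk]
        simp
      · simp [hxval]

lemma bot_rec (grid : List (List String)) (dy x y : Int)
    (h : (cellAt grid x y).isSome) :
    at2 (botSweep dy grid) x y = stepF grid 1 dy x y (at2 (botSweep dy grid)) := by
  obtain ⟨c, hc⟩ := Option.isSome_iff_exists.mp h
  obtain ⟨hx, r, hr, hy, hrc⟩ := cellAt_elim hc
  obtain ⟨hxlt, -⟩ := List.getElem?_eq_some_iff.mp hr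
  obtain ⟨hylt, -⟩ := List.getElem?_eq_some_iff.mp hrc
  have hTx : (botSweep dy grid)[x.toNat]? =
      some (mkRow dy (x + 1) (grid[x.toNat + 1]?.getD [])
        (((botSweep dy grid)[x.toNat + 1]?).getD []) r.length) := by
    rw [botSweep, botGo_get, ← botSweep, hr]
    simp only [Option.map_some]
    have : (0:Int) + x.toNat + 1 = x + 1 := by omega
    rw [this]
  rw [at2, stepF, lookAt_nonneg _ hx, hTx]
  simp only [Option.bind_some, lookAt_nonneg _ hy, mkRow_get, hylt, if_pos]
  have hyc : ((y.toNat : Int) + dy) = y + dy := by omega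
  have hx1 : (0:Int) ≤ x + 1 := by omega
  have hx1n : (x + 1).toNat = x.toNat + 1 := by omega
  have hcell : cellAt grid (x + 1) (y + dy) = lookAt (grid[x.toNat + 1]?.getD []) (y + dy) := by
    rw [cellAt, lookAt_nonneg _ hx1, hx1n]
    cases hg : grid[x.toNat + 1]? with
    | none => simp [lookAt]
    | some g => rfl
  rw [hcell]
  simp only [vcell, hyc]
  cases hlo : lookAt (grid[x.toNat + 1]?.getD []) (y + dy) with
  | none => simp
  | some c' =>
    have hg : ∃ g, grid[x.toNat + 1]? = some g := by
      cases hgg : grid[x.toNat + 1]? with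
      | none => rw [hgg] at hlo; simp [lookAt] at hlo
      | some g => exact ⟨g, rfl⟩
    obtain ⟨g, hgg⟩ := hg
    have hlen : x.toNat + 1 < grid.length := (List.getElem?_eq_some_iff.mp hgg).1
    obtain ⟨dk, hdk⟩ := Option.isSome_iff_exists.mp (by
      have hl : (botSweep dy grid).length = grid.length := botGo_length dy 0 grid
      simp [hl, hlen] : ((botSweep dy grid)[x.toNat + 1]?).isSome = true)
    simp only
    split
    · rw [at2, lookAt_nonneg _ hx1, hx1n, hdk]
      simp
    · rfl

lemma left_rec (grid : List (List String)) (x y : Int)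
    (h : (cellAt grid x y).isSome) :
    at2 (leftTable grid) x y = stepF grid 0 (-1) x y (at2 (leftTable grid)) := by
  obtain ⟨c, hc⟩ := Option.isSome_iff_exists.mp h
  obtain ⟨hx, r, hr, hy, hrc⟩ := cellAt_elim hc
  obtain ⟨hxlt, -⟩ := List.getElem?_eq_some_iff.mp hr
  obtain ⟨hylt, -⟩ := List.getElem?_eq_some_iff.mp hrc
  have hTx : (leftTable grid)[x.toNat]? = some (leftGo (x : Int) 0 none none r) := by
    rw [leftTable, List.getElem?_map, PySem.List.getElem?_enumerate, hr]
    simp only [Option.map_some]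
    rw [show (0:Int) + (x.toNat:Int) = x from by omega]
  have hxz : x + 0 = x := by ring
  rw [at2, stepF, hxz, lookAt_nonneg _ hx, hTx]
  simp only [Option.bind_some, lookAt_nonneg _ hy]
  cases hk : y.toNat with
  | zero =>
    have hr0 : r[0]? = some c := by rw [← hk]; exact hrc
    rw [leftGo_get_zero, hr0]
    have : cellAt grid x (y + -1) = none := by
      rw [cellAt, lookAt_nonneg _ hx, hr]
      simp [lookAt_neg r (by omega : y + -1 < 0)]
    rw [this]
    simp
  | succ k =>
    have hrk1 : r[k+1]? = some c := by rw [← hk]; exact hrc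
    have hk2 : k < r.length := by omega
    obtain ⟨pc, hpc⟩ := Option.isSome_iff_exists.mp (by simp [hk2] : (r[k]?).isSome = true)
    have hy1 : (0:Int) ≤ y + -1 := by omega
    have hy1n : (y + -1).toNat = k := by omega
    have hcell : cellAt grid x (y + -1) = some pc := by
      rw [cellAt, lookAt_nonneg _ hx, hr]
      simp [lookAt_nonneg _ hy1, hy1n, hpc]
    rw [leftGo_get_succ, hrk1, hcell, hpc]
    simp only [Option.bind_some, Option.map_some, Option.join_some]
    split
    · rw [at2, lookAt_nonneg _ hx, hTx]
      simp [lookAt_nonneg _ hy1, hy1n]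
    · have : (0:Int) + (k:Int) = y + -1 := by omega
      rw [this]

lemma right_rec (grid : List (List String)) (x y : Int)
    (h : (cellAt grid x y).isSome) :
    at2 (rightTable grid) x y = stepF grid 0 1 x y (at2 (rightTable grid)) := by
  obtain ⟨c, hc⟩ := Option.isSome_iff_exists.mp h
  obtain ⟨hx, r, hr, hy, hrc⟩ := cellAt_elim hc
  obtain ⟨hxlt, -⟩ := List.getElem?_eq_some_iff.mp hr
  obtain ⟨hylt, -⟩ := List.getElem?_eq_some_iff.mp hrc
  have hTx : (rightTable grid)[x.toNat]? = some (rightGo (x : Int) 0 r) := by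
    rw [rightTable, List.getElem?_map, PySem.List.getElem?_enumerate, hr]
    simp only [Option.map_some]
    rw [show (0:Int) + (x.toNat:Int) = x from by omega]
  have hxz : x + 0 = x := by ring
  rw [at2, stepF, hxz, lookAt_nonneg _ hx, hTx]
  simp only [Option.bind_some, lookAt_nonneg _ hy]
  rw [rightGo_get, hrc]
  simp only [Option.map_some, Option.join_some]
  have hy1 : (0:Int) ≤ y + 1 := by omega
  have hy1n : (y + 1).toNat = y.toNat + 1 := by omega
  have hcell : cellAt grid x (y + 1) = r[y.toNat + 1]? := by
    rw [cellAt, lookAt_nonneg _ hx, hr]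
    simp [lookAt_nonneg _ hy1, hy1n]
  rw [hcell]
  cases hl : r[y.toNat + 1]? with
  | none => rfl
  | some c' =>
    simp only
    split
    · rw [at2, lookAt_nonneg _ hx, hTx]
      simp [lookAt_nonneg _ hy1, hy1n]
    · have : (0:Int) + (y.toNat:Int) + 1 = y + 1 := by omega
      rw [this]

lemma row_len_le_sum {grid : List (List String)} {k : Nat} {r : List String}
    (h : grid[k]? = some r) : r.length ≤ (grid.map List.length).sum := by
  have hm : r ∈ grid := List.mem_of_getElem? h
  have h2 : r.length ∈ grid.map List.length := List.mem_map_of_mem hm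
  exact List.le_sum_of_mem h2

lemma scan_eq_top (grid : List (List String)) (dy x y : Int)
    (h : (cellAt grid x y).isSome) :
    scanA grid (-1) dy (pvFuel grid) x y = at2 (topSweep dy grid) x y := by
  obtain ⟨c, hc⟩ := Option.isSome_iff_exists.mp h
  obtain ⟨hx, r, hr, hy, hrc⟩ := cellAt_elim hc
  obtain ⟨hxlt, -⟩ := List.getElem?_eq_some_iff.mp hr
  apply scan_eq_of_rec grid (-1) dy _ (fun a _ => (a+1).toNat)
  · intro x' y' h'; exact top_rec grid dy x' y' h'
  · intro x' y' h1 h2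
    obtain ⟨c1, hc1⟩ := Option.isSome_iff_exists.mp h1
    obtain ⟨hx1, -, -, -, -⟩ := cellAt_elim hc1
    obtain ⟨c2, hc2⟩ := Option.isSome_iff_exists.mp h2
    obtain ⟨hx2, -, -, -, -⟩ := cellAt_elim hc2
    omega
  · exact h
  · simp only [pvFuel]
    omega

lemma scan_eq_bot (grid : List (List String)) (dy x y : Int)
    (h : (cellAt grid x y).isSome) :
    scanA grid 1 dy (pvFuel grid) x y = at2 (botSweep dy grid) x y := by
  obtain ⟨c, hc⟩ := Option.isSome_iff_exists.mp h
  obtain ⟨hx, r, hr, hy, hrc⟩ := cellAt_elim hc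
  obtain ⟨hxlt, -⟩ := List.getElem?_eq_some_iff.mp hr
  apply scan_eq_of_rec grid 1 dy _ (fun a _ => grid.length - a.toNat)
  · intro x' y' h'; exact bot_rec grid dy x' y' h'
  · intro x' y' h1 h2
    obtain ⟨c1, hc1⟩ := Option.isSome_iff_exists.mp h1
    obtain ⟨hx1, r1, hr1, -, -⟩ := cellAt_elim hc1
    obtain ⟨c2, hc2⟩ := Option.isSome_iff_exists.mp h2
    obtain ⟨hx2, r2, hr2, -, -⟩ := cellAt_elim hc2
    obtain ⟨hxlt1, -⟩ := List.getElem?_eq_some_iff.mp hr1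
    obtain ⟨hxlt2, -⟩ := List.getElem?_eq_some_iff.mp hr2
    omega
  · exact h
  · simp only [pvFuel]
    omega

lemma scan_eq_left (grid : List (List String)) (x y : Int)
    (h : (cellAt grid x y).isSome) :
    scanA grid 0 (-1) (pvFuel grid) x y = at2 (leftTable grid) x y := by
  obtain ⟨c, hc⟩ := Option.isSome_iff_exists.mp h
  obtain ⟨hx, r, hr, hy, hrc⟩ := cellAt_elim hc
  obtain ⟨hylt, -⟩ := List.getElem?_eq_some_iff.mp hrc
  have hsum := row_len_le_sum hr
  apply scan_eq_of_rec grid 0 (-1) _ (fun _ b => (b+1).toNat)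
  · intro x' y' h'; exact left_rec grid x' y' h'
  · intro x' y' h1 h2
    obtain ⟨c1, hc1⟩ := Option.isSome_iff_exists.mp h1
    obtain ⟨-, -, -, hy1, -⟩ := cellAt_elim hc1
    obtain ⟨c2, hc2⟩ := Option.isSome_iff_exists.mp h2
    obtain ⟨-, -, -, hy2, -⟩ := cellAt_elim hc2
    omega
  · exact h
  · simp only [pvFuel]
    omega

lemma scan_eq_right (grid : List (List String)) (x y : Int)
    (h : (cellAt grid x y).isSome) :
    scanA grid 0 1 (pvFuel grid) x y = at2 (rightTable grid) x y := by
  obtain ⟨c, hc⟩ := Option.isSome_iff_exists.mp h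
  obtain ⟨hx, r, hr, hy, hrc⟩ := cellAt_elim hc
  obtain ⟨hylt, -⟩ := List.getElem?_eq_some_iff.mp hrc
  have hsum := row_len_le_sum hr
  apply scan_eq_of_rec grid 0 1 _ (fun a b => ((lookAt grid a).getD []).length - b.toNat)
  · intro x' y' h'; exact right_rec grid x' y' h'
  · intro x' y' h1 h2
    obtain ⟨c1, hc1⟩ := Option.isSome_iff_exists.mp h1
    obtain ⟨hx1, r1, hr1, hy1, -⟩ := cellAt_elim hc1
    obtain ⟨c2, hc2⟩ := Option.isSome_iff_exists.mp h2
    obtain ⟨hx2, r2, hr2, hy2, hrc2⟩ := cellAt_elim hc2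
    obtain ⟨hylt2, -⟩ := List.getElem?_eq_some_iff.mp hrc2
    have hx20 : x' + 0 = x' := by ring
    rw [hx20] at hr2 ⊢
    have hrow : r2 = r1 := by rw [hr2] at hr1; exact (Option.some.injEq _ _).mp hr1
    subst hrow
    simp only [lookAt_nonneg _ hx1, hr1, Option.getD_some]
    omega
  · exact h
  · simp only [lookAt_nonneg _ hx, hr, Option.getD_some, pvFuel]
    omega

lemma foldl_app_filterMap (grid : List (List String)) (fu : Nat) (x y : Int) :
    ∀ (l : List (Int × Int)) (acc : List (Int × Int)),
      l.foldl (fun acc d => match scanA grid d.1 d.2 fu x y with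
        | some pt => acc ++ [pt] | none => acc) acc
        = acc ++ l.filterMap (fun d => scanA grid d.1 d.2 fu x y) := by
  intro l
  induction l with
  | nil => simp
  | cons d ds ih =>
    intro acc
    cases hf : scanA grid d.1 d.2 fu x y <;>
      simp [List.foldl_cons, hf, ih]

-- ===== VERDICT (by name: the statement is the Claim_ definition above) =====
theorem compute_seen_neighbors_spec : Claim_equal_compute_seen_neighbors := by
  intro grid _
  unfold Spec_compute_seen_neighbors compute_seen_neighbors compute_seen_neighbors_alt
  simp only
  apply List.map_congr_left
  intro p hp
  obtain ⟨k, hk, hpe⟩ := (PySem.List.mem_enumerate_iff _ _ _).mp hp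
  subst hpe
  apply List.map_congr_left
  intro q hq
  obtain ⟨j, hj, hqe⟩ := (PySem.List.mem_enumerate_iff _ _ _).mp hq
  subst hqe
  simp only [zero_add]
  by_cases hdot : grid[k][j] = "."
  · simp [hdot]
  · simp only [hdot, if_false]
    have hcell : cellAt grid (k : Int) (j : Int) = some grid[k][j] := by
      rw [cellAt, lookAt_nonneg _ (Int.natCast_nonneg k), Int.toNat_natCast,
        List.getElem?_eq_getElem hk, Option.bind_some,
        lookAt_nonneg _ (Int.natCast_nonneg j), Int.toNat_natCast,
        List.getElem?_eq_getElem hj]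
    have hS : (cellAt grid (k : Int) (j : Int)).isSome := by rw [hcell]; rfl
    have h1 := scan_eq_top grid (-1) (k : Int) (j : Int) hS
    have h2 := scan_eq_top grid 0 (k : Int) (j : Int) hS
    have h3 := scan_eq_top grid 1 (k : Int) (j : Int) hS
    have h4 := scan_eq_left grid (k : Int) (j : Int) hS
    have h5 := scan_eq_right grid (k : Int) (j : Int) hS
    have h6 := scan_eq_bot grid (-1) (k : Int) (j : Int) hS
    have h7 := scan_eq_bot grid 0 (k : Int) (j : Int) hS
    have h8 := scan_eq_bot grid 1 (k : Int) (j : Int) hS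
    rw [foldl_app_filterMap]
    simp only [dirList, List.nil_append, List.filterMap_cons, List.filterMap_nil]
    rw [h1, h2, h3, h4, h5, h6, h7, h8]
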